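-- pv_equiv track=rewrite | github.com/ElkeCodes/AdventOfCode2016 | days/04/test_04.py | calculate_sector_id
-- ===== SOURCE A (Python) =====
-- def calculate_sector_id(data: tuple[str, int, str]) -> int:
--     name, sector_id, checksum = data
--     occurences = {}
--     for letter in name:
--         occurences[letter] = occurences.get(letter, 0) + 1
--     sorted_occurences = sorted(
--         occurences.items(), key=lambda occurence: (-occurence[1], occurence[0])
--     )
--     calculated_checksum = "".join([letter for (letter, _) in sorted_occurences[:5]])
--     if calculated_checksum == checksum:
--         return sector_id
--     return 0
-- ===== SOURCE B (Python) =====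
-- def calculate_sector_id(data):
--     name, sector_id, checksum = data
--     counts = {}
--     for letter in name:
--         counts[letter] = counts.get(letter, 0) + 1
--     items = list(counts.items())
--     top = ""
--     for _ in range(5):
--         if not items:
--             break
--         best = min(items, key=lambda item: (-item[1], item[0]))
--         top += best[0]
--         items.remove(best)
--     return sector_id if top == checksum else 0
-- ===== Notes on version B (the rewrite author's own statement) =====
-- stated objective: alternative
-- what changed: B replaces the full sort of the occurrence items by partial selection: up to 5 rounds, each extracting the (-count, letter)-minimal item from the remaining list, building the checksum incrementally.
import Mathlib
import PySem

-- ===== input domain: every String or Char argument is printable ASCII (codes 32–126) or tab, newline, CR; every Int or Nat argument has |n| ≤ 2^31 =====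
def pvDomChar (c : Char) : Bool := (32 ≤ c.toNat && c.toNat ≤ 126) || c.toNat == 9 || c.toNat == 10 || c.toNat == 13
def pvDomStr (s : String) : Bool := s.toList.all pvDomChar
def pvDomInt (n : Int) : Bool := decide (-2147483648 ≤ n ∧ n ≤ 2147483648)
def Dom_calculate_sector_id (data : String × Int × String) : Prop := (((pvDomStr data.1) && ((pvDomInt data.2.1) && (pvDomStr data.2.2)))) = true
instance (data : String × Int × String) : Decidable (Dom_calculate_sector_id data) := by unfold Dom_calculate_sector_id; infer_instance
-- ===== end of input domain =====

-- B replaces A's full sort of the occurrence items by a partial selection of the top-5 items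
-- (5 rounds of extract-minimum under the key (-count, letter)); alternative algorithm, same results.

-- ===== PORT A =====
def calculate_sector_id (data : String × Int × String) : Int :=
  let name := data.1
  let sector_id := data.2.1
  let checksum := data.2.2
  let occurences : PySem.Dict Char Int :=
    name.toList.foldl (fun d letter => d.insert letter (d.getD letter 0 + 1)) PySem.Dict.empty
  let sorted_occurences :=
    PySem.List.sorted2 occurences.items (fun p => -p.2) (fun p => p.1)
  -- "".join([letter for (letter, _) in sorted_occurences[:5]])
  let calculated_checksum :=
    String.mk ((PySem.List.slice sorted_occurences none (some 5)).map (fun p => p.1))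
  if calculated_checksum == checksum then sector_id else 0

-- ===== PORT B =====
-- the 'for _ in range(5): … break / min / remove' loop of Source B, accumulating the letters
def pvSelect : Nat → List (Char × Int) → List Char
  | 0, _ => []
  | Nat.succ n, items =>
    if items.isEmpty then []
    else
      match PySem.List.min2? items (fun p => -p.2) (fun p => p.1) with
      | none => []          -- unreachable: items nonempty
      | some best =>
        match PySem.List.remove? items best with
        | some rest => best.1 :: pvSelect n rest
        | none => []        -- unreachable: best ∈ items (Python would raise ValueError)

def calculate_sector_id_alt (data : String × Int × String) : Int :=
  let name := data.1
  let sector_id := data.2.1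
  let checksum := data.2.2
  let counts : PySem.Dict Char Int :=
    name.toList.foldl (fun d letter => d.insert letter (d.getD letter 0 + 1)) PySem.Dict.empty
  let top := String.mk (pvSelect 5 counts.items)
  if top == checksum then sector_id else 0

-- ===== PRECONDITION & SPEC =====
def Spec_calculate_sector_id (data : String × Int × String) (out : Int) : Prop := out = calculate_sector_id_alt data
instance (data : String × Int × String) (out : Int) : Decidable (Spec_calculate_sector_id data out) := by unfold Spec_calculate_sector_id; infer_instance

-- ===== CLAIM (what is proved, stated in full; the proofs are below) =====
def Claim_equal_calculate_sector_id : Prop := ∀ (data : String × Int × String), Dom_calculate_sector_id data → Spec_calculate_sector_id data (calculate_sector_id data)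

-- ===== LEMMAS AND PROOFS =====

-- the Boolean lexicographic strict order sorted2 / min2? use for key (-count, letter)
def pvLt (a b : Char × Int) : Bool :=
  decide ((-a.2 : Int) < -b.2) || (!decide ((-b.2 : Int) < -a.2) && decide (a.1 < b.1))

theorem pvLt_iff (a b : Char × Int) :
    pvLt a b = true ↔ (b.2 < a.2 ∨ (¬ a.2 < b.2 ∧ a.1 < b.1)) := by
  simp only [pvLt, Bool.or_eq_true, Bool.and_eq_true, Bool.not_eq_true',
    decide_eq_true_eq, decide_eq_false_iff_not, neg_lt_neg_iff]

theorem pvLt_false_iff (a b : Char × Int) :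
    pvLt a b = false ↔ ¬ (b.2 < a.2 ∨ (¬ a.2 < b.2 ∧ a.1 < b.1)) := by
  rw [← pvLt_iff]
  simp

theorem pvLt_irrefl (a : Char × Int) : pvLt a a = false := by
  simp [pvLt]

theorem pvLt_asymm {a b : Char × Int} (h : pvLt a b = true) : pvLt b a = false := by
  rw [pvLt_iff] at h
  rw [pvLt_false_iff]
  intro hc
  rcases h with h | ⟨h1, h2⟩ <;> rcases hc with hc | ⟨hc1, hc2⟩
  · omega
  · omega
  · omega
  · exact absurd hc2 (lt_asymm h2)

theorem pvLt_trans {a b c : Char × Int} (h1 : pvLt a b = true) (h2 : pvLt b c = true) :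
    pvLt a c = true := by
  rw [pvLt_iff] at h1 h2 ⊢
  rcases h1 with h1 | ⟨h1a, h1b⟩ <;> rcases h2 with h2 | ⟨h2a, h2b⟩
  · left; omega
  · left; omega
  · left; omega
  · exact Or.inr ⟨by omega, lt_trans h1b h2b⟩

theorem pvLt_negtrans {a b c : Char × Int} (h1 : pvLt a b = false) (h2 : pvLt b c = false) :
    pvLt a c = false := by
  rw [pvLt_false_iff] at h1 h2 ⊢
  push_neg at h1 h2
  intro hc
  rcases hc with hc | ⟨hc1, hc2⟩
  · omega
  · have hab : b.1 ≤ a.1 := h1.2 (by omega)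
    have hbc : c.1 ≤ b.1 := h2.2 (by omega)
    exact absurd hc2 (not_lt.mpr (le_trans hbc hab))

theorem pvLt_antisymm {a b : Char × Int} (h1 : pvLt a b = false) (h2 : pvLt b a = false) :
    a = b := by
  rw [pvLt_false_iff] at h1 h2
  push_neg at h1 h2
  have hi : a.2 = b.2 := by omega
  have hc : a.1 = b.1 := le_antisymm (h2.2 (by omega)) (h1.2 (by omega))
  exact Prod.ext hc hi

-- insertion (one step of sorted2) preserves sortedness
theorem insertBy_pairwise (x : Char × Int) (ys : List (Char × Int))
    (h : ys.Pairwise (fun a b => pvLt b a = false)) :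
    (PySem.List.insertBy pvLt x ys).Pairwise (fun a b => pvLt b a = false) := by
  induction ys with
  | nil => simp [PySem.List.insertBy]
  | cons y ys ih =>
    rcases List.pairwise_cons.mp h with ⟨hy, hys⟩
    by_cases hxy : pvLt x y = true
    · rw [show PySem.List.insertBy pvLt x (y :: ys) = x :: y :: ys by
        simp [PySem.List.insertBy, hxy]]
      refine List.Pairwise.cons ?_ h
      intro z hz
      rcases List.mem_cons.mp hz with rfl | hz
      · exact pvLt_asymm hxy
      · rw [Bool.eq_false_iff]
        intro hzx
        exact absurd (pvLt_trans hzx hxy) (Bool.eq_false_iff.mp (hy z hz))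
    · rw [show PySem.List.insertBy pvLt x (y :: ys) = y :: PySem.List.insertBy pvLt x ys by
        simp [PySem.List.insertBy, hxy]]
      refine List.Pairwise.cons ?_ (ih hys)
      intro z hz
      rcases (PySem.List.mem_insertBy pvLt x z ys).mp hz with rfl | hz
      · exact Bool.eq_false_iff.mpr hxy
      · exact hy z hz

theorem foldl_insertBy_pairwise (xs : List (Char × Int)) :
    ∀ acc : List (Char × Int), acc.Pairwise (fun a b => pvLt b a = false) →
      (xs.foldl (fun acc x => PySem.List.insertBy pvLt x acc) acc).Pairwise
        (fun a b => pvLt b a = false) := by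
  induction xs with
  | nil => intro acc h; simpa using h
  | cons x xs ih => intro acc h; exact ih _ (insertBy_pairwise x acc h)

theorem sorted2_eq_foldl (xs : List (Char × Int)) :
    PySem.List.sorted2 xs (fun p => -p.2) (fun p => p.1) false
      = xs.foldl (fun acc x => PySem.List.insertBy pvLt x acc) [] := rfl

theorem sorted2_pairwise (xs : List (Char × Int)) :
    (PySem.List.sorted2 xs (fun p => -p.2) (fun p => p.1) false).Pairwise
      (fun a b => pvLt b a = false) := by
  rw [sorted2_eq_foldl]
  exact foldl_insertBy_pairwise xs [] (by simp)

-- min2? characterisation (first minimum): fold invariant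
def pvStep (acc : Option (Char × Int)) (x : Char × Int) : Option (Char × Int) :=
  match acc with
  | none => some x
  | some m => if pvLt x m = true then some x else some m

theorem min2?_eq_foldl (xs : List (Char × Int)) :
    PySem.List.min2? xs (fun p => -p.2) (fun p => p.1) = xs.foldl pvStep none := by
  unfold PySem.List.min2?
  congr 1
  funext acc x
  cases acc <;> simp [pvStep, pvLt]

theorem min2?_fold_spec (xs : List (Char × Int)) :
    ∀ (acc m : Char × Int),
      xs.foldl pvStep (some acc) = some m →
      (m = acc ∨ m ∈ xs) ∧ pvLt acc m = false ∧ ∀ y ∈ xs, pvLt y m = false := by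
  induction xs with
  | nil =>
    intro acc m h
    simp only [List.foldl_nil, Option.some.injEq] at h
    subst h
    exact ⟨Or.inl rfl, pvLt_irrefl _, by simp⟩
  | cons x xs ih =>
    intro acc m h
    rw [show ((x :: xs).foldl pvStep (some acc))
      = (xs.foldl pvStep (if pvLt x acc = true then some x else some acc)) from rfl] at h
    by_cases hxa : pvLt x acc = true
    · rw [if_pos hxa] at h
      obtain ⟨hmem, hxm, hall⟩ := ih x m h
      refine ⟨?_, ?_, ?_⟩
      · rcases hmem with rfl | hmem
        · exact Or.inr List.mem_cons_self
        · exact Or.inr (List.mem_cons_of_mem _ hmem)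
      · rw [Bool.eq_false_iff]
        intro hc
        exact absurd (pvLt_trans hxa hc) (Bool.eq_false_iff.mp hxm)
      · intro y hy
        rcases List.mem_cons.mp hy with rfl | hy
        · exact hxm
        · exact hall y hy
    · rw [if_neg hxa] at h
      obtain ⟨hmem, ham, hall⟩ := ih acc m h
      refine ⟨?_, ham, ?_⟩
      · rcases hmem with rfl | hmem
        · exact Or.inl rfl
        · exact Or.inr (List.mem_cons_of_mem _ hmem)
      · intro y hy
        rcases List.mem_cons.mp hy with rfl | hy
        · exact pvLt_negtrans (Bool.eq_false_iff.mpr hxa) ham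
        · exact hall y hy

theorem min2?_spec {xs : List (Char × Int)} {m : Char × Int}
    (h : PySem.List.min2? xs (fun p => -p.2) (fun p => p.1) = some m) :
    m ∈ xs ∧ ∀ y ∈ xs, pvLt y m = false := by
  cases xs with
  | nil => simp [PySem.List.min2?] at h
  | cons x xs =>
    rw [min2?_eq_foldl, show (x :: xs).foldl pvStep none = xs.foldl pvStep (some x) from rfl] at h
    have h' := h
    obtain ⟨hmem, hxm, hall⟩ := min2?_fold_spec xs x m h'
    refine ⟨?_, ?_⟩
    · rcases hmem with rfl | hmem
      · exact List.mem_cons_self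
      · exact List.mem_cons_of_mem _ hmem
    · intro y hy
      rcases List.mem_cons.mp hy with rfl | hy
      · exact hxm
      · exact hall y hy

theorem min2?_fold_some (xs : List (Char × Int)) :
    ∀ acc : Char × Int, ∃ m, xs.foldl pvStep (some acc) = some m := by
  induction xs with
  | nil => intro acc; exact ⟨acc, rfl⟩
  | cons y ys ih =>
    intro acc
    show ∃ m, ys.foldl pvStep (if pvLt y acc = true then some y else some acc) = some m
    by_cases h : pvLt y acc = true
    · rw [if_pos h]; exact ih y
    · rw [if_neg h]; exact ih acc

theorem min2?_nonempty (x : Char × Int) (xs : List (Char × Int)) :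
    ∃ m, PySem.List.min2? (x :: xs) (fun p => -p.2) (fun p => p.1) = some m := by
  rw [min2?_eq_foldl]
  exact min2?_fold_some xs x

-- the core lemma: n rounds of selection = first n letters of the sort
theorem pvSelect_eq_take (n : Nat) :
    ∀ xs : List (Char × Int),
      pvSelect n xs =
        ((PySem.List.sorted2 xs (fun p => -p.2) (fun p => p.1) false).take n).map
          (fun p => p.1) := by
  induction n with
  | zero => intro xs; simp [pvSelect]
  | succ n ih =>
    intro xs
    have hperm := PySem.List.sorted2_perm xs (fun p => -p.2) (fun p => p.1) false
    cases hs : PySem.List.sorted2 xs (fun p => -p.2) (fun p => p.1) false with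
    | nil =>
      have hxs : xs = [] := ((hs ▸ hperm).symm).eq_nil
      subst hxs
      simp [pvSelect]
    | cons m t =>
      have hpw : (m :: t).Pairwise (fun a b => pvLt b a = false) := hs ▸ sorted2_pairwise xs
      have hmt_perm : (m :: t).Perm xs := hs ▸ hperm
      have hm_mem : m ∈ xs := hmt_perm.mem_iff.mp List.mem_cons_self
      have hne : xs ≠ [] := by
        intro h
        rw [h] at hmt_perm
        have := hmt_perm.length_eq
        simp at this
      obtain ⟨x, xs', rfl⟩ := List.exists_cons_of_ne_nil hne
      obtain ⟨m', hmin⟩ := min2?_nonempty x xs'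
      obtain ⟨hm'_mem, hm'_min⟩ := min2?_spec hmin
      have hm_min : ∀ y ∈ x :: xs', pvLt y m = false := by
        intro y hy
        rcases List.mem_cons.mp (hmt_perm.symm.mem_iff.mp hy) with hEq | hyt
        · rw [hEq]; exact pvLt_irrefl _
        · exact (List.pairwise_cons.mp hpw).1 y hyt
      have hmm : m' = m := pvLt_antisymm (hm_min m' hm'_mem) (hm'_min m hm_mem)
      subst hmm
      have hrem : PySem.List.remove? (x :: xs') m' = some ((x :: xs').erase m') :=
        PySem.List.remove?_eq_some_erase _ m' hm'_mem
      have hsel : pvSelect (n + 1) (x :: xs') = m'.1 :: pvSelect n ((x :: xs').erase m') := by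
        show (if (x :: xs').isEmpty then [] else _) = _
        rw [if_neg (by simp)]
        simp only [hmin, hrem]
      have hperm_t : ((x :: xs').erase m').Perm t :=
        List.Perm.cons_inv ((List.perm_cons_erase hm'_mem).symm.trans hmt_perm.symm)
      have hsorted_rest :
          PySem.List.sorted2 ((x :: xs').erase m') (fun p => -p.2) (fun p => p.1) false = t := by
        refine List.eq_of_perm_of_sorted ?_ (sorted2_pairwise _) (List.pairwise_cons.mp hpw).2
          ((PySem.List.sorted2_perm _ _ _ _).trans hperm_t)
        intro a b _ _ h1 h2
        exact pvLt_antisymm h2 h1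
      rw [hsel, ih, hsorted_rest]
      simp

-- ===== VERDICT (by name: the statement is the Claim_ definition above) =====
theorem calculate_sector_id_spec : Claim_equal_calculate_sector_id := by
  intro data _
  show calculate_sector_id data = calculate_sector_id_alt data
  simp only [calculate_sector_id, calculate_sector_id_alt]
  rw [PySem.List.slice_to _ (by norm_num), pvSelect_eq_take]
  simp
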